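-- pv_equiv track=rewrite | github.com/vryy/4C | utilities/code_checks/baciheader.py | _extract_first_doxy_block
-- ===== SOURCE A (Python) =====
-- def _extract_first_doxy_block(cont):
--   blk = []
--   marker = False
--   for line in cont:
--     if (not marker) and ("/*!" in line or "/**" in line or "/*" in line or "/!*" in line) and ("*/" not in line):
--       marker = True
--     if marker:
--       blk.append(line)
--       if "*/" in line:
--         return blk
--   return []
-- ===== SOURCE B (Python) =====
-- def _extract_first_doxy_block(cont):
--   lines = list(cont)
--   starts = [i for i, l in enumerate(lines)
--             if ("/*!" in l or "/**" in l or "/*" in l or "/!*" in l) and "*/" not in l]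
--   closes = [i for i, l in enumerate(lines) if "*/" in l]
--   if not starts:
--     return []
--   s = starts[0]
--   c = next((j for j in closes if j >= s), None)
--   if c is None:
--     return []
--   return lines[s:c + 1]
-- ===== Notes on version B (the rewrite author's own statement) =====
-- stated objective: alternative
-- what changed: Replaces A's single stateful scan (a marker flag threaded through the loop, appending as it goes) by an index computation: comprehensions collect the indices of opener lines and of '*/' lines, the block is then the slice lines[s:c+1] for the first opener index s and the first closer index c >= s.
import Mathlib
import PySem

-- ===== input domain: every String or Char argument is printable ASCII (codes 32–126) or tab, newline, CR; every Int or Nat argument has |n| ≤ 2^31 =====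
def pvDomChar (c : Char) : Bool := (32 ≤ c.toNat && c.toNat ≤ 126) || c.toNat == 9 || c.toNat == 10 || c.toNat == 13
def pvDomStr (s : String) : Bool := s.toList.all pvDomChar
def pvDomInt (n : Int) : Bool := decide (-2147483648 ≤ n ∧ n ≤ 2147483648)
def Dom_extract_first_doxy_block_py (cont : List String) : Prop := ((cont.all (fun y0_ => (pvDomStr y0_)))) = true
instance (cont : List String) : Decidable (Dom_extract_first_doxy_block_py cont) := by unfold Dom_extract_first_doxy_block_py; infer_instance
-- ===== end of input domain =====

-- B replaces A's flag-driven collecting scan by an index computation: build the lists of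
-- opener-line and closer-line indices, pick the first opener s and the first closer c ≥ s,
-- and return the slice lines[s:c+1]; alternative decomposition, same cost.

-- ===== PORT A =====
-- the start condition shared verbatim by both Pythons:
-- ("/*!" in line or "/**" in line or "/*" in line or "/!*" in line) and ("*/" not in line)
def doxyClose (line : String) : Bool := PySem.Str.isIn "*/" line

def doxyStart (line : String) : Bool :=
  (PySem.Str.isIn "/*!" line || PySem.Str.isIn "/**" line || PySem.Str.isIn "/*" line
    || PySem.Str.isIn "/!*" line) && !(doxyClose line)

def goA : List String → List String → Bool → List String
  | [], _, _ => []
  | line :: rest, blk, marker =>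
    let marker' := if (!marker) && doxyStart line then true else marker
    if marker' then
      let blk' := blk ++ [line]
      if doxyClose line then blk' else goA rest blk' marker'
    else goA rest blk marker'

def extract_first_doxy_block_py (cont : List String) : List String := goA cont [] false

-- ===== PORT B =====
-- [i for i, l in enumerate(lines) if p(l)]  (index comprehension)
def idxsFrom (p : String → Bool) : Nat → List String → List Nat
  | _, [] => []
  | i, l :: r => if p l then i :: idxsFrom p (i + 1) r else idxsFrom p (i + 1) r

-- next((j for j in js if j >= s), None)
def firstGE (s : Nat) : List Nat → Option Nat
  | [] => none
  | j :: r => if s ≤ j then some j else firstGE s r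

def extract_first_doxy_block_py_alt (cont : List String) : List String :=
  let lines := cont
  let starts := idxsFrom doxyStart 0 lines
  let closes := idxsFrom (fun l => doxyClose l) 0 lines
  match starts.head? with
  | none => []
  | some s =>
    match firstGE s closes with
    | none => []
    | some c => PySem.List.slice lines (some (s : Int)) (some ((c + 1 : Nat) : Int))

-- ===== PRECONDITION & SPEC =====
def Spec_extract_first_doxy_block_py (cont : List String) (out : List String) : Prop := out = extract_first_doxy_block_py_alt cont
instance (cont : List String) (out : List String) : Decidable (Spec_extract_first_doxy_block_py cont out) := by unfold Spec_extract_first_doxy_block_py; infer_instance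

-- ===== CLAIM (what is proved, stated in full; the proofs are below) =====
def Claim_equal_extract_first_doxy_block_py : Prop := ∀ (cont : List String), Dom_extract_first_doxy_block_py cont → Spec_extract_first_doxy_block_py cont (extract_first_doxy_block_py cont)

-- ===== LEMMAS AND PROOFS =====
theorem idxsFrom_shift (p : String → Bool) (xs : List String) : ∀ k : Nat,
    idxsFrom p k xs = (idxsFrom p 0 xs).map (k + ·) := by
  induction xs with
  | nil => intro k; rfl
  | cons l r ih =>
    intro k
    simp only [idxsFrom]
    split_ifs with h
    · rw [List.map_cons, ih (k + 1), ih 1, List.map_map]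
      refine congrArg₂ List.cons (by omega) ?_
      exact List.map_congr_left (fun j _ => by simp only [Function.comp_apply]; omega)
    · rw [ih (k + 1), ih 1, List.map_map]
      exact List.map_congr_left (fun j _ => by simp only [Function.comp_apply]; omega)

theorem firstGE_succ_map (s : Nat) (js : List Nat) :
    firstGE (s + 1) (js.map (1 + ·)) = (firstGE s js).map (1 + ·) := by
  induction js with
  | nil => rfl
  | cons j r ih =>
    simp only [List.map_cons, firstGE]
    split_ifs with h1 h2 h2
    · rfl
    · omega
    · omega
    · exact ih

theorem firstGE_zero (js : List Nat) : firstGE 0 js = js.head? := by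
  cases js with
  | nil => rfl
  | cons j r => simp [firstGE]

theorem firstGE_ge (s : Nat) (js : List Nat) (c : Nat) (h : firstGE s js = some c) : s ≤ c := by
  induction js with
  | nil => simp [firstGE] at h
  | cons j r ih =>
    simp only [firstGE] at h
    split_ifs at h with hj
    · cases h; omega
    · exact ih h

-- A's loop after the marker is set computes B's slice result
theorem goA_true_eq (xs : List String) : ∀ blk,
    goA xs blk true =
      match (idxsFrom (fun l => doxyClose l) 0 xs).head? with
      | none => []
      | some c => blk ++ xs.take (c + 1) := by
  induction xs with
  | nil => intro blk; rfl
  | cons l r ih =>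
    intro blk
    simp only [goA, Bool.not_true, Bool.false_and, Bool.false_eq_true, if_false, if_true]
    by_cases hc : doxyClose l = true
    · simp only [hc, if_true, idxsFrom, List.head?_cons, List.take_succ_cons, List.take_zero]
    · have hc' : doxyClose l = false := Bool.eq_false_iff.mpr hc
      simp only [hc', Bool.false_eq_true, if_false, idxsFrom]
      rw [ih (blk ++ [l]), idxsFrom_shift _ r 1]
      cases h : (idxsFrom (fun l => doxyClose l) 0 r).head? with
      | none => simp only [h, List.head?_map, Option.map_none]
      | some c =>
        simp only [h, List.head?_map, Option.map_some, List.take_succ_cons,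
          List.append_assoc, List.cons_append, List.nil_append]
        rw [Nat.add_comm 1 c]

theorem goA_false_eq_alt (cont : List String) :
    goA cont [] false = extract_first_doxy_block_py_alt cont := by
  induction cont with
  | nil => rfl
  | cons l r ih =>
    by_cases hs : doxyStart l = true
    · have hclose : doxyClose l = false := by
        unfold doxyStart at hs
        have := (Bool.and_eq_true _ _).mp hs
        simpa using this.2
      simp only [extract_first_doxy_block_py_alt, idxsFrom, hs, if_true, hclose,
        Bool.false_eq_true, if_false, List.head?_cons]
      rw [firstGE_zero, idxsFrom_shift (fun l => doxyClose l) r 1]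
      simp only [goA, Bool.not_false, Bool.true_and, hs, if_true, hclose,
        Bool.false_eq_true, if_false, List.nil_append]
      rw [goA_true_eq r [l]]
      simp only [List.head?_map]
      cases h : (idxsFrom (fun l => doxyClose l) 0 r).head? with
      | none => simp only [Option.map_none]
      | some c =>
        simp only [Option.map_some]
        rw [PySem.List.slice_natCast]
        simp only [List.drop_zero, Nat.sub_zero]
        rw [show (1 + c + 1) = (c + 1) + 1 from by omega]
        simp [List.take_succ_cons]
    · have hs' : doxyStart l = false := Bool.eq_false_iff.mpr hs
      simp only [goA, Bool.not_false, Bool.true_and, hs', Bool.false_eq_true, if_false]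
      rw [ih]
      simp only [extract_first_doxy_block_py_alt, idxsFrom, hs', Bool.false_eq_true, if_false]
      rw [idxsFrom_shift doxyStart r 1]
      cases hst : (idxsFrom doxyStart 0 r).head? with
      | none => simp only [hst, List.head?_map, Option.map_none]
      | some s =>
        simp only [hst, List.head?_map, Option.map_some]
        by_cases hc : doxyClose l = true
        · simp only [hc, if_true]
          rw [idxsFrom_shift (fun l => doxyClose l) r 1]
          have h0 : firstGE (1 + s) (0 :: (idxsFrom (fun l => doxyClose l) 0 r).map (1 + ·))
              = firstGE (1 + s) ((idxsFrom (fun l => doxyClose l) 0 r).map (1 + ·)) := by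
            simp [firstGE]
          rw [h0, show (1 + s) = s + 1 from by omega, firstGE_succ_map]
          cases hfc : firstGE s (idxsFrom (fun l => doxyClose l) 0 r) with
          | none => simp only [Option.map_none]
          | some c =>
            have hsc : s ≤ c := firstGE_ge s _ c hfc
            simp only [Option.map_some]
            rw [PySem.List.slice_natCast, PySem.List.slice_natCast]
            simp only [List.drop_succ_cons]
            congr 1
            omega
        · have hc' : doxyClose l = false := Bool.eq_false_iff.mpr hc
          simp only [hc', Bool.false_eq_true, if_false]
          rw [idxsFrom_shift (fun l => doxyClose l) r 1]
          rw [show (1 + s) = s + 1 from by omega, firstGE_succ_map]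
          cases hfc : firstGE s (idxsFrom (fun l => doxyClose l) 0 r) with
          | none => simp only [Option.map_none]
          | some c =>
            have hsc : s ≤ c := firstGE_ge s _ c hfc
            simp only [Option.map_some]
            rw [PySem.List.slice_natCast, PySem.List.slice_natCast]
            simp only [List.drop_succ_cons]
            congr 1
            omega

-- ===== VERDICT (by name: the statement is the Claim_ definition above) =====
theorem extract_first_doxy_block_py_spec : Claim_equal_extract_first_doxy_block_py := by
  intro cont _
  show extract_first_doxy_block_py cont = extract_first_doxy_block_py_alt cont
  exact goA_false_eq_alt cont
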